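-- pv_equiv track=rewrite | github.com/AishwaryaRamesh23/task | source/palindrome.py | check_palindromes
-- ===== SOURCE A (Python) =====
-- from collections import Counter
--
-- def is_palindrome(s):
--     s = s.replace(" ", "").lower()                                     # to ensure the comparison is case-insensitive and space-insensitive
--     return s == s[::-1]
--
-- def can_form_palindrome(s):
--     s = s.replace(" ", "").lower()
--     count = Counter(s)                                                 # count occurrences of elements in string
--     odd_count = sum(1 for count in count.values() if count % 2 != 0)
--     return odd_count <= 1
--
-- def check_palindromes(words):
--     """Check if each word is a palindrome and if it can be rearranged to form a palindrome."""
--     results = {}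
--     for word in words:
--         results[word] = {
--             "is_palindrome": is_palindrome(word),
--             "can_form_palindrome": can_form_palindrome(word)
--         }
--     return results
-- ===== SOURCE B (Python) =====
-- def _judge(word):
--     """Normalize once, then judge both properties in-place."""
--     t = word.replace(" ", "").lower()
--     # two-pointer palindrome scan
--     is_pal = True
--     i, j = 0, len(t) - 1
--     while i < j:
--         if t[i] != t[j]:
--             is_pal = False
--             break
--         i += 1
--         j -= 1
--     # parity-toggle set: chars occurring an odd number of times
--     odd = set()
--     for ch in t:
--         if ch in odd:
--             odd.discard(ch)
--         else:
--             odd.add(ch)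
--     return {"is_palindrome": is_pal, "can_form_palindrome": len(odd) <= 1}
--
--
-- def check_palindromes(words):
--     """Check if each word is a palindrome and if it can be rearranged to form a palindrome."""
--     return {word: _judge(word) for word in words}
-- ===== Notes on version B (the rewrite author's own statement) =====
-- stated objective: faster
-- what changed: Each word is normalized once (A normalizes twice, once per helper) and judged in one helper: the palindrome test becomes a two-pointer scan (no reversed copy built) and the rearrangeability test maintains a parity-toggle set of odd-count characters instead of building a Counter and then summing over its values; the result dict is a comprehension.
import Mathlib
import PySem

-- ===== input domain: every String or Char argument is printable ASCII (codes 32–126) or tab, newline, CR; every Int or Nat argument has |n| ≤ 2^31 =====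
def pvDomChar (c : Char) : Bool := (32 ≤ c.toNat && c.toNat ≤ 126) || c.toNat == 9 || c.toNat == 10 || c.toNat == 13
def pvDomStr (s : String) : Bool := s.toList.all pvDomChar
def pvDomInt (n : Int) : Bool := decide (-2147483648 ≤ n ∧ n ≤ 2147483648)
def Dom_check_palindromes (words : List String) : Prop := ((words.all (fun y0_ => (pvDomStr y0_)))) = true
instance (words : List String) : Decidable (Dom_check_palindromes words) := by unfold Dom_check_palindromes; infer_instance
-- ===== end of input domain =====

-- B normalizes each word once, tests palindromicity with a two-pointer scan (no reversed copy) and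
-- rearrangeability with a parity-toggle set instead of A's Counter-then-sum; equivalence proved on all inputs.


-- ===== PORT A =====
-- s.replace(" ", "").lower()
def pvNorm (s : String) : String := PySem.Str.lower (PySem.Str.replace s " " "")

-- is_palindrome: s == s[::-1]  (slicing with step -1 never raises, so .getD is exact)
def pvIsPalindromeA (s : String) : Bool :=
  let t := pvNorm s
  t == ((PySem.Str.slice? t none none (-1)).getD t)

-- can_form_palindrome: Counter, then sum(1 for count in count.values() if count % 2 != 0) <= 1
def pvCanFormA (s : String) : Bool :=
  let t := pvNorm s
  let count := PySem.Dict.counter t.toList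
  let odd_count : Int :=
    (((PySem.Dict.values count).filter (fun c => PySem.Int.mod c 2 ≠ 0)).map (fun _ => (1 : Int))).sum
  decide (odd_count ≤ 1)

def check_palindromes (words : List String) : List (String × List (String × Bool)) :=
  (words.foldl
    (fun (results : PySem.Dict String (List (String × Bool))) word =>
      results.insert word
        [("is_palindrome", pvIsPalindromeA word), ("can_form_palindrome", pvCanFormA word)])
    PySem.Dict.empty).items

-- ===== PORT B =====
-- two-pointer scan; both indices stay inside [0, cs.length), so List.getD is exact for t[i] / t[j]
def pvPal2 (cs : List Char) (i j : Nat) : Bool :=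
  if i < j then
    if cs.getD i ' ' != cs.getD j ' ' then false
    else pvPal2 cs (i + 1) (j - 1)
  else true
termination_by j - i

-- parity toggle: ch is discarded if present, added if absent
def pvToggle (odd : PySem.Set Char) (ch : Char) : PySem.Set Char :=
  if PySem.Set.contains odd ch then PySem.Set.discard odd ch else PySem.Set.add odd ch

def pvJudge (word : String) : List (String × Bool) :=
  let t := pvNorm word
  let cs := t.toList
  let isPal := pvPal2 cs 0 (cs.length - 1)
  let odd := cs.foldl pvToggle PySem.Set.empty
  [("is_palindrome", isPal), ("can_form_palindrome", decide (PySem.Set.len odd ≤ 1))]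

def check_palindromes_alt (words : List String) : List (String × List (String × Bool)) :=
  (words.foldl
    (fun (d : PySem.Dict String (List (String × Bool))) word => d.insert word (pvJudge word))
    PySem.Dict.empty).items

-- ===== PRECONDITION & SPEC =====
def Spec_check_palindromes (words : List String) (out : List (String × List (String × Bool))) : Prop := out = check_palindromes_alt words
instance (words : List String) (out : List (String × List (String × Bool))) : Decidable (Spec_check_palindromes words out) := by unfold Spec_check_palindromes; infer_instance

-- ===== CLAIM (what is proved, stated in full; the proofs are below) =====
def Claim_equal_check_palindromes : Prop := ∀ (words : List String), Dom_check_palindromes words → Spec_check_palindromes words (check_palindromes words)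

-- ===== LEMMAS AND PROOFS =====

-- the two-pointer scan decides the mirrored-index property on [i, j]
lemma pvPal2_eq (cs : List Char) :
    ∀ n i j, j - i ≤ n →
      pvPal2 cs i j = decide (∀ k, i ≤ k → k ≤ j → cs.getD k ' ' = cs.getD (i + j - k) ' ') := by
  intro n
  induction n with
  | zero =>
    intro i j hji
    unfold pvPal2
    rw [if_neg (by omega)]
    symm
    rw [decide_eq_true_iff]
    intro k hik hkj
    have : k = i ∧ i = j := by omega
    obtain ⟨rfl, rfl⟩ := this
    congr 1
    omega
  | succ n ih =>
    intro i j hji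
    by_cases h : i < j
    · unfold pvPal2
      rw [if_pos h]
      by_cases hne : cs.getD i ' ' = cs.getD j ' '
      · rw [if_neg (by simp only [bne_iff_ne, ne_eq, Decidable.not_not]; exact hne)]
        rw [ih (i + 1) (j - 1) (by omega)]
        rw [decide_eq_decide]
        constructor
        · intro hmid k hik hkj
          rcases eq_or_lt_of_le hik with rfl | hik'
          · have : i + j - i = j := by omega
            rw [this]; exact hne
          rcases eq_or_lt_of_le hkj with rfl | hkj'
          · have : i + k - k = i := by omega
            rw [this]; exact hne.symm
          · have := hmid k (by omega) (by omega)
            have heq : i + 1 + (j - 1) - k = i + j - k := by omega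
            rw [heq] at this
            exact this
        · intro hall k hik hkj
          have := hall k (by omega) (by omega)
          have heq : i + 1 + (j - 1) - k = i + j - k := by omega
          rw [heq]
          exact this
      · rw [if_pos (by simp only [bne_iff_ne, ne_eq]; exact hne)]
        symm
        rw [decide_eq_false_iff_not]
        intro hall
        have := hall i le_rfl (by omega)
        have heq : i + j - i = j := by omega
        rw [heq] at this
        exact hne this
    · unfold pvPal2
      rw [if_neg h]
      symm
      rw [decide_eq_true_iff]
      intro k hik hkj
      have : k = i ∧ i = j := by omega
      obtain ⟨rfl, rfl⟩ := this
      congr 1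
      omega

-- the mirrored-index property at [0, n-1] is palindromicity
lemma pal_prop_iff (cs : List Char) :
    (∀ k, 0 ≤ k → k ≤ cs.length - 1 → cs.getD k ' ' = cs.getD (0 + (cs.length - 1) - k) ' ') ↔
      cs = cs.reverse := by
  rcases cs.eq_nil_or_concat with rfl | ⟨_, _, _⟩
  · simp
  · have hlen : 0 < cs.length := by
      rename_i h; subst h; simp
    constructor
    · intro hp
      apply List.ext_getElem (by simp)
      intro k h1 h2
      have hk : k ≤ cs.length - 1 := by omega
      have := hp k (by omega) hk
      rw [List.getD_eq_getElem cs ' ' h1, List.getD_eq_getElem cs ' ' (by omega)] at this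
      rw [List.getElem_reverse]
      simpa using this
    · intro h k _ hk
      have h1 : k < cs.length := by omega
      have h2 : cs.reverse[(cs.length - 1 - k)]? = cs[(cs.length - 1 - k)]? := by rw [← h]
      rw [List.getElem?_reverse (by omega)] at h2
      have h3 : cs.length - 1 - (cs.length - 1 - k) = k := by omega
      rw [h3] at h2
      rw [List.getD_eq_getElem?_getD, List.getD_eq_getElem?_getD, h2]
      congr 2
      omega

lemma isPal_agree (s : String) :
    pvIsPalindromeA s = pvPal2 (pvNorm s).toList 0 ((pvNorm s).toList.length - 1) := by
  simp only [pvIsPalindromeA]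
  rw [PySem.Str.slice?_none_none_neg_one, Option.getD_some]
  rw [pvPal2_eq (pvNorm s).toList ((pvNorm s).toList.length - 1) 0 ((pvNorm s).toList.length - 1)
    (by omega)]
  rw [Bool.eq_iff_iff, beq_iff_eq, decide_eq_true_iff, String.ext_iff, String.toList_ofList]
  exact (pal_prop_iff (pvNorm s).toList).symm

-- one toggle step, characterised by membership
lemma mem_pvToggle (acc : PySem.Set Char) (x c : Char) :
    c ∈ pvToggle acc x ↔ (if c = x then c ∉ acc else c ∈ acc) := by
  unfold pvToggle
  by_cases hx : x ∈ acc
  · rw [if_pos (by simp only [PySem.Set.contains_iff]; exact hx)]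
    rw [PySem.Set.mem_discard]
    by_cases hcx : c = x
    · subst hcx; simp [hx]
    · simp [hcx]
  · rw [if_neg (by simp only [PySem.Set.contains_iff]; exact hx)]
    rw [PySem.Set.mem_add]
    by_cases hcx : c = x
    · subst hcx; simp [hx]
    · simp [hcx]

-- the toggle loop collects exactly the characters occurring an odd number of times
lemma mem_toggle (cs : List Char) :
    ∀ acc c, c ∈ cs.foldl pvToggle acc ↔ ((c ∈ acc) ↔ cs.count c % 2 = 0) := by
  induction cs with
  | nil => intro acc c; simp
  | cons x rest ih =>
    intro acc c
    rw [List.foldl_cons, ih, mem_pvToggle]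
    by_cases hcx : c = x
    · subst hcx
      rw [List.count_cons_self, if_pos rfl]
      by_cases hc : c ∈ acc <;> simp only [hc] <;> constructor <;> intro h <;>
        first
          | omega
          | (simp_all; omega)
    · have hcount : List.count c (x :: rest) = List.count c rest := by
        simp [Ne.symm hcx]
      rw [hcount, if_neg hcx]

lemma nodup_toggle (cs : List Char) :
    ∀ acc : PySem.Set Char, acc.Nodup → (cs.foldl pvToggle acc).Nodup := by
  induction cs with
  | nil => intro acc h; simpa using h
  | cons x rest ih =>
    intro acc h
    rw [List.foldl_cons]
    apply ih
    unfold pvToggle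
    split
    · exact PySem.Set.nodup_discard acc x h
    · exact PySem.Set.nodup_add acc x h

lemma toggle_length (cs : List Char) :
    (cs.foldl pvToggle PySem.Set.empty).length
      = List.countP (fun c => decide (cs.count c % 2 = 1)) (PySem.Set.ofList cs) := by
  have hperm : (cs.foldl pvToggle PySem.Set.empty).Perm
      ((PySem.Set.ofList cs).filter (fun c => decide (cs.count c % 2 = 1))) := by
    rw [List.perm_ext_iff_of_nodup (nodup_toggle cs _ (by simp [PySem.Set.empty]))
      ((PySem.Set.nodup_ofList cs).filter _)]
    intro c
    rw [mem_toggle, List.mem_filter, PySem.Set.mem_ofList]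
    constructor
    · intro h
      have hne : ¬ (cs.count c % 2 = 0) := by
        intro h0
        have hmem : c ∈ PySem.Set.empty := h.mpr h0
        simp [PySem.Set.empty] at hmem
      have hodd : cs.count c % 2 = 1 := by omega
      have hpos : 0 < cs.count c := by omega
      exact ⟨List.count_pos_iff.mp hpos, by simpa using hodd⟩
    · rintro ⟨hm, hq⟩
      have hodd : cs.count c % 2 = 1 := by simpa using hq
      constructor
      · intro h2; simp [PySem.Set.empty] at h2
      · intro h2; omega
  rw [hperm.length_eq, List.countP_eq_length_filter]

lemma canForm_agree (s : String) :
    pvCanFormA s =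
      decide (PySem.Set.len ((pvNorm s).toList.foldl pvToggle PySem.Set.empty) ≤ 1) := by
  unfold pvCanFormA
  simp only [PySem.Dict.values, PySem.Dict.items_counter, List.map_map]
  rw [PySem.List.sum_map_const_int, ← List.countP_eq_length_filter, List.countP_map]
  rw [PySem.Set.len, toggle_length]
  rw [Bool.eq_iff_iff, decide_eq_true_iff, decide_eq_true_iff]
  rw [List.countP_congr (q := fun c => decide ((pvNorm s).toList.count c % 2 = 1)) ?_]
  · omega
  · intro a _
    simp only [Function.comp_apply, decide_eq_true_eq, ne_eq]
    have hm := PySem.Int.mod_natCast (List.count a (pvNorm s).toList) 2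
    push_cast at hm
    rw [hm]
    omega

lemma judge_agree (word : String) :
    [("is_palindrome", pvIsPalindromeA word), ("can_form_palindrome", pvCanFormA word)] = pvJudge word := by
  simp only [pvJudge]
  rw [isPal_agree, canForm_agree]

-- ===== VERDICT (by name: the statement is the Claim_ definition above) =====
theorem check_palindromes_spec : Claim_equal_check_palindromes := by
  intro words _
  unfold Spec_check_palindromes check_palindromes check_palindromes_alt
  have h : (fun (results : PySem.Dict String (List (String × Bool))) word =>
      results.insert word
        [("is_palindrome", pvIsPalindromeA word), ("can_form_palindrome", pvCanFormA word)]) =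
      (fun (d : PySem.Dict String (List (String × Bool))) word => d.insert word (pvJudge word)) := by
    funext d w
    rw [judge_agree]
  rw [h]
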